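-- pv_equiv track=rewrite | github.com/RSebXC/IPC2_Proyecto1_202204496 | index.py | agrupar_filas
-- ===== SOURCE A (Python) =====
-- def agrupar_filas(matriz_umbral):
--     grupos = {}
--     fila_indices = {}
--
--     for fila_num, fila in enumerate(matriz_umbral):
--         fila_str = ''.join(map(str, fila))
--         if fila_str in fila_indices:
--             grupo_id = fila_indices[fila_str]
--             grupos[grupo_id].append(fila_num)
--         else:
--             nuevo_grupo_id = len(grupos) + 1
--             grupos[nuevo_grupo_id] = [fila_num]
--             fila_indices[fila_str] = nuevo_grupo_id
--
--     return grupos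
-- ===== SOURCE B (Python) =====
-- def agrupar_filas(matriz_umbral):
--     # Dict-free brute force: list the first-occurrence rows, then collect each
--     # group's indices by rescanning the whole key list per representative.
--     claves = [''.join(map(str, fila)) for fila in matriz_umbral]
--     representantes = [i for i, c in enumerate(claves) if c not in claves[:i]]
--     return {g + 1: [j for j in range(len(claves)) if claves[j] == claves[r]]
--             for g, r in enumerate(representantes)}
-- ===== Notes on version B (the rewrite author's own statement) =====
-- stated objective: alternative
-- what changed: B drops A's two incrementally maintained dicts entirely: it builds the key list, selects first-occurrence representative indices by prefix membership scans, and then builds each group's index list by rescanning the whole key list per representative (staged comprehensions, O(n^2) comparisons instead of hashing).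
import Mathlib
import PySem

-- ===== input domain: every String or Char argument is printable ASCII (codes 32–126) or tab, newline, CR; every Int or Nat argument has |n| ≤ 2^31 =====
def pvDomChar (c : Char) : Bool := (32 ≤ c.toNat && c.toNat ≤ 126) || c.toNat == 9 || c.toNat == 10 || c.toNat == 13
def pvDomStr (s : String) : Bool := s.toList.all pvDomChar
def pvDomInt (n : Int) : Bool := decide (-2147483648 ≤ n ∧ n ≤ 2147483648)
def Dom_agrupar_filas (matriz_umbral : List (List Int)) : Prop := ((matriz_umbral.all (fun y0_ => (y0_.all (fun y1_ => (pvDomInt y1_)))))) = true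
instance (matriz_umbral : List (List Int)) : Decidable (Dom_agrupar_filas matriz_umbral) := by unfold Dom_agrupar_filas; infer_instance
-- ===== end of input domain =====

-- B replaces A's two incrementally maintained dicts by staged dict-free passes:
-- first-occurrence representative indices found by prefix membership scans, then each
-- group's index list collected by rescanning the whole key list; objective: alternative.

-- ''.join(map(str, fila)) — shared row-key helper of both programs
def pvKey (fila : List Int) : String := PySem.Str.join "" (fila.map PySem.Int.toStr)

-- ===== PORT A =====
-- loop body of A: state is (grupos, fila_indices)
def pvStepA (st : PySem.Dict Int (List Int) × PySem.Dict String Int) (p : Int × List Int) :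
    PySem.Dict Int (List Int) × PySem.Dict String Int :=
  let fila_str := pvKey p.2
  if st.2.contains fila_str then
    -- fila_indices[fila_str] and grupos[grupo_id].append: both keys are present under
    -- the 'in' guard, so getD/modify are exact here
    let grupo_id := st.2.getD fila_str 0
    (st.1.modify grupo_id [] (fun l => l ++ [p.1]), st.2)
  else
    let nuevo_grupo_id : Int := (st.1.size : Int) + 1
    (st.1.insert nuevo_grupo_id [p.1], st.2.insert fila_str nuevo_grupo_id)

def agrupar_filas (matriz_umbral : List (List Int)) : List (Int × List Int) :=
  ((PySem.List.enumerate matriz_umbral).foldl pvStepA (PySem.Dict.empty, PySem.Dict.empty)).1.items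

-- ===== PORT B =====
-- representantes = [i for i, c in enumerate(claves) if c not in claves[:i]]
def pvRepresentantes (claves : List String) : List Int :=
  ((PySem.List.enumerate claves).filter
    (fun p => !((PySem.List.slice claves none (some p.1)).contains p.2))).map Prod.fst

-- [j for j in range(len(claves)) if claves[j] == claves[r]]
-- (j from range and r from enumerate are in range, so pyGetD is exact for claves[j], claves[r])
def pvGrupoDe (claves : List String) (r : Int) : List Int :=
  (PySem.List.pyRange 0 (claves.length : Int)).filter
    (fun j => PySem.List.pyGetD claves j "" == PySem.List.pyGetD claves r "")

-- {g + 1: [...] for g, r in enumerate(representantes)}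
def agrupar_filas_alt (matriz_umbral : List (List Int)) : List (Int × List Int) :=
  let claves := matriz_umbral.map pvKey
  let representantes := pvRepresentantes claves
  ((PySem.List.enumerate representantes).foldl
      (fun (d : PySem.Dict Int (List Int)) q => d.insert (q.1 + 1) (pvGrupoDe claves q.2))
      PySem.Dict.empty).items

-- ===== PRECONDITION & SPEC =====
def Spec_agrupar_filas (matriz_umbral : List (List Int)) (out : List (Int × List Int)) : Prop := out = agrupar_filas_alt matriz_umbral
instance (matriz_umbral : List (List Int)) (out : List (Int × List Int)) : Decidable (Spec_agrupar_filas matriz_umbral out) := by unfold Spec_agrupar_filas; infer_instance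

-- ===== CLAIM (what is proved, stated in full; the proofs are below) =====
def Claim_equal_agrupar_filas : Prop := ∀ (matriz_umbral : List (List Int)), Dom_agrupar_filas matriz_umbral → Spec_agrupar_filas matriz_umbral (agrupar_filas matriz_umbral)

-- ===== LEMMAS AND PROOFS =====

-- the id list 1..n that A's grupos keys always form
def pvIds (n : Nat) : List Int := (List.range n).map (fun i : Nat => ((i : Int) + 1))

lemma pvIds_length (n : Nat) : (pvIds n).length = n := by simp [pvIds]

lemma pvIds_getElem (n i : Nat) (h : i < (pvIds n).length) : (pvIds n)[i] = (i : Int) + 1 := by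
  simp [pvIds]

lemma pvIds_succ (n : Nat) : pvIds (n + 1) = pvIds n ++ [(n : Int) + 1] := by
  simp [pvIds, List.range_succ]

lemma mem_pvIds (n : Nat) (x : Int) : x ∈ pvIds n ↔ ∃ i : Nat, i < n ∧ x = (i : Int) + 1 := by
  simp only [pvIds, List.mem_map, List.mem_range]
  constructor
  · rintro ⟨i, hi, rfl⟩; exact ⟨i, hi, rfl⟩
  · rintro ⟨i, hi, rfl⟩; exact ⟨i, hi, rfl⟩

lemma pvIds_nodup (n : Nat) : (pvIds n).Nodup := by
  exact List.Nodup.map (fun a b h => by omega) List.nodup_range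

-- pyGetD facts on the appended key list
lemma pvGetD_append_lt (ks : List String) (c : String) {j : Int} (h0 : 0 ≤ j)
    (h1 : j < (ks.length : Int)) :
    PySem.List.pyGetD (ks ++ [c]) j "" = PySem.List.pyGetD ks j "" := by
  have hj : j.toNat < ks.length := by omega
  rw [PySem.List.pyGetD_eq_getElem _ _ h0 (by simp; omega),
    PySem.List.pyGetD_eq_getElem _ _ h0 h1]
  exact List.getElem_append_left _

lemma pvGetD_append_last (ks : List String) (c : String) :
    PySem.List.pyGetD (ks ++ [c]) (ks.length : Int) "" = c := by
  rw [PySem.List.pyGetD_eq_getElem _ _ (by positivity) (by simp)]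
  simp

lemma pvGetD_mem (ks : List String) {r : Int} (h0 : 0 ≤ r) (h1 : r < (ks.length : Int)) :
    PySem.List.pyGetD ks r "" ∈ ks := by
  rw [PySem.List.pyGetD_eq_getElem _ _ h0 h1]
  exact List.getElem_mem _

lemma pvReps_mem_bounds (ks : List String) {r : Int} (h : r ∈ pvRepresentantes ks) :
    0 ≤ r ∧ r < (ks.length : Int) := by
  unfold pvRepresentantes at h
  obtain ⟨p, hp, rfl⟩ := List.mem_map.mp h
  obtain ⟨k, hk, rfl⟩ := (PySem.List.mem_enumerate_iff _ _ _).mp (List.mem_filter.mp hp).1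
  constructor
  · simp
  · simpa using hk

lemma pvReps_append (ks : List String) (c : String) :
    pvRepresentantes (ks ++ [c]) =
      pvRepresentantes ks ++ (if c ∈ ks then [] else [(ks.length : Int)]) := by
  unfold pvRepresentantes
  rw [PySem.List.enumerate_append, List.filter_append, List.map_append]
  congr 1
  · congr 1
    apply List.filter_congr
    intro p hp
    obtain ⟨k, hk, rfl⟩ := (PySem.List.mem_enumerate_iff _ _ _).mp hp
    simp only [zero_add]
    rw [PySem.List.slice_to _ (by positivity), PySem.List.slice_to _ (by positivity),
      List.take_append_of_le_length (by simp; omega)]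
  · simp only [PySem.List.enumerate_cons, PySem.List.enumerate_nil, zero_add]
    simp only [List.filter_cons, List.filter_nil]
    rw [PySem.List.slice_to _ (by positivity)]
    have ht : (((ks.length : Int)).toNat) = ks.length := by simp
    rw [ht, List.take_left]
    by_cases hmem : c ∈ ks
    · simp [hmem]
    · simp [hmem]

-- occurrence list of a fixed key value
def pvOccK (ks : List String) (k : String) : List Int :=
  (PySem.List.pyRange 0 (ks.length : Int)).filter (fun j => PySem.List.pyGetD ks j "" == k)

lemma pvGrupoDe_eq_occK (ks : List String) (r : Int) :
    pvGrupoDe ks r = pvOccK ks (PySem.List.pyGetD ks r "") := rfl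

lemma pvOccK_append (ks : List String) (c k : String) :
    pvOccK (ks ++ [c]) k = pvOccK ks k ++ (if c == k then [(ks.length : Int)] else []) := by
  unfold pvOccK
  have hlen : (((ks ++ [c]).length : Nat) : Int) = (ks.length : Int) + 1 := by simp
  rw [hlen, PySem.List.pyRange_one_succ_right (by positivity), List.filter_append]
  congr 1
  · apply List.filter_congr
    intro j hj
    have hb := PySem.List.mem_pyRange_one.mp hj
    rw [pvGetD_append_lt ks c hb.1 hb.2]
  · simp only [List.filter_cons, List.filter_nil, pvGetD_append_last]

lemma pvOccK_nil_of_not_mem (ks : List String) {c : String} (h : c ∉ ks) : pvOccK ks c = [] := by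
  unfold pvOccK
  rw [List.filter_eq_nil_iff]
  intro j hj
  have hb := PySem.List.mem_pyRange_one.mp hj
  have hm := pvGetD_mem ks hb.1 hb.2
  simp only [beq_iff_eq]
  intro heq
  exact h (heq ▸ hm)

-- the loop invariant of A's fold, phrased against B's declarative representatives
def pvInvKS (ks : List String) (st : PySem.Dict Int (List Int) × PySem.Dict String Int) : Prop :=
  st.1.keys = pvIds (pvRepresentantes ks).length ∧
  (∀ g (h : g < (pvRepresentantes ks).length),
      st.1.getD ((g : Int) + 1) [] = pvGrupoDe ks ((pvRepresentantes ks)[g])) ∧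
  st.2.keys = (pvRepresentantes ks).map (fun r => PySem.List.pyGetD ks r "") ∧
  (∀ g (h : g < (pvRepresentantes ks).length),
      st.2.getD (PySem.List.pyGetD ks ((pvRepresentantes ks)[g]) "") 0 = (g : Int) + 1) ∧
  st.2.keys.Nodup ∧
  (∀ k, st.2.contains k = decide (k ∈ ks))

lemma pvInvKS_empty : pvInvKS [] (PySem.Dict.empty, PySem.Dict.empty) := by
  have hreps : pvRepresentantes [] = [] := rfl
  refine ⟨?_, ?_, ?_, ?_, ?_, ?_⟩ <;>
    simp [hreps, pvIds, PySem.Dict.keys_empty, PySem.Dict.contains_empty]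

lemma pvInvKS_step (ks : List String) (x : List Int)
    (st : PySem.Dict Int (List Int) × PySem.Dict String Int) (h : pvInvKS ks st) :
    pvInvKS (ks ++ [pvKey x]) (pvStepA st ((ks.length : Int), x)) := by
  obtain ⟨k1, k2, k3, k4, k5, k6⟩ := h
  set c := pvKey x with hc
  set reps := pvRepresentantes ks with hreps
  set R := reps.length with hR
  have hkeysmem : ∀ k, k ∈ st.2.keys ↔ k ∈ ks := by
    intro k
    have h6 := k6 k
    rw [PySem.Dict.contains_eq_decide_mem_keys] at h6
    exact decide_eq_decide.mp h6
  have hbnds : ∀ g (hg : g < R), 0 ≤ reps[g] ∧ reps[g] < (ks.length : Int) := by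
    intro g hg
    exact pvReps_mem_bounds ks (List.getElem_mem hg)
  have hstab : ∀ g (hg : g < R),
      PySem.List.pyGetD (ks ++ [c]) (reps[g]) "" = PySem.List.pyGetD ks (reps[g]) "" := by
    intro g hg
    exact pvGetD_append_lt ks c (hbnds g hg).1 (hbnds g hg).2
  have hkeymem : ∀ g (hg : g < R), PySem.List.pyGetD ks (reps[g]) "" ∈ ks := by
    intro g hg
    exact pvGetD_mem ks (hbnds g hg).1 (hbnds g hg).2
  by_cases hmem : c ∈ ks
  · -- repeated key: then-branch, representatives unchanged
    have hrep' : pvRepresentantes (ks ++ [c]) = reps := by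
      rw [pvReps_append, if_pos hmem, List.append_nil]
    have hco : st.2.contains c = true := by rw [k6 c]; exact decide_eq_true hmem
    have hckeys : c ∈ st.2.keys := (hkeysmem c).mpr hmem
    rw [k3] at hckeys
    obtain ⟨g0, hg0, hmg⟩ := List.mem_iff_getElem.mp hckeys
    have hg0R : g0 < R := by simpa using hg0
    have hkey0 : PySem.List.pyGetD ks (reps[g0]) "" = c := by simpa using hmg
    have hgid : st.2.getD c 0 = (g0 : Int) + 1 := by rw [← hkey0]; exact k4 g0 hg0R
    have hgin : st.1.contains ((g0 : Int) + 1) = true := by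
      rw [PySem.Dict.contains_eq_decide_mem_keys, k1]
      exact decide_eq_true ((mem_pvIds _ _).mpr ⟨g0, hg0R, rfl⟩)
    simp only [pvStepA, ← hc, hco, if_true, hgid]
    refine ⟨?_, ?_, ?_, ?_, ?_, ?_⟩
    · rw [PySem.Dict.keys_modify, PySem.Dict.keys_insert_of_contains _ _ hgin, k1, hrep']
    · intro g hg
      simp only [hrep'] at hg ⊢
      rw [pvGrupoDe_eq_occK, hstab g hg, pvOccK_append]
      by_cases hgg : g = g0
      · subst hgg
        rw [PySem.Dict.getD_modify_self, k2 g hg, pvGrupoDe_eq_occK, hkey0]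
        simp
      · have hne1 : ((g : Int) + 1) ≠ ((g0 : Int) + 1) := by
          intro hh; exact hgg (by omega)
        rw [PySem.Dict.getD_modify_of_ne _ _ _ hne1, k2 g hg, pvGrupoDe_eq_occK]
        have hne2 : (c == PySem.List.pyGetD ks (reps[g]) "") = false := by
          rw [beq_eq_false_iff_ne, ← hkey0]
          intro heq
          apply hgg
          have hnd : (reps.map (fun r => PySem.List.pyGetD ks r "")).Nodup := k3 ▸ k5
          have hgm : g < (reps.map (fun r => PySem.List.pyGetD ks r "")).length := by simpa using hg
          have hg0m : g0 < (reps.map (fun r => PySem.List.pyGetD ks r "")).length := by simpa using hg0R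
          have heq' : (reps.map (fun r => PySem.List.pyGetD ks r ""))[g] =
              (reps.map (fun r => PySem.List.pyGetD ks r ""))[g0] := by
            simpa using heq.symm
          exact hnd.getElem_inj_iff.mp heq'
        rw [hne2]
        simp
    · rw [k3, hrep']
      refine (List.map_congr_left ?_).symm
      intro r hr
      have hb := pvReps_mem_bounds ks hr
      exact pvGetD_append_lt ks c hb.1 hb.2
    · intro g hg
      simp only [hrep'] at hg ⊢
      rw [hstab g hg]
      exact k4 g hg
    · exact k5
    · intro k
      rw [k6 k, decide_eq_decide]
      simp only [List.mem_append, List.mem_singleton]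
      constructor
      · exact Or.inl
      · rintro (hk | rfl)
        · exact hk
        · exact hmem
  · -- new key: else-branch, one representative appended
    have hrep' : pvRepresentantes (ks ++ [c]) = reps ++ [(ks.length : Int)] := by
      rw [pvReps_append, if_neg hmem]
    have hco : st.2.contains c = false := by rw [k6 c]; exact decide_eq_false hmem
    have hsize : (st.1.size : Int) = (R : Int) := by
      have h2 := congrArg List.length k1
      have h3 : st.1.size = R := by simpa [PySem.Dict.size, PySem.Dict.keys, pvIds_length] using h2
      exact_mod_cast h3
    have hgnotin : st.1.contains ((R : Int) + 1) = false := by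
      rw [PySem.Dict.contains_eq_decide_mem_keys, k1]
      apply decide_eq_false
      rw [mem_pvIds]
      rintro ⟨i, hi, he⟩
      omega
    have hlen' : (pvRepresentantes (ks ++ [c])).length = R + 1 := by
      rw [hrep', hR]; simp
    simp only [pvStepA, ← hc, hco, Bool.false_eq_true, if_false, hsize]
    refine ⟨?_, ?_, ?_, ?_, ?_, ?_⟩
    · rw [PySem.Dict.keys_insert_of_not_contains _ _ hgnotin, k1, hlen', pvIds_succ]
    · intro g hg
      rw [hlen'] at hg
      by_cases hgR : g < R
      · have he : (pvRepresentantes (ks ++ [c]))[g]'(by omega) = reps[g] := by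
          simp only [hrep']
          exact List.getElem_append_left _
        rw [he]
        have hne1 : ((g : Int) + 1) ≠ ((R : Int) + 1) := by intro hh; omega
        rw [PySem.Dict.getD_insert_of_ne _ _ _ hne1, k2 g hgR, pvGrupoDe_eq_occK,
          pvGrupoDe_eq_occK, hstab g hgR, pvOccK_append]
        have hne2 : (c == PySem.List.pyGetD ks (reps[g]) "") = false := by
          rw [beq_eq_false_iff_ne]
          intro heq
          exact hmem (heq ▸ hkeymem g hgR)
        rw [hne2]
        simp
      · have hgR' : g = R := by omega
        subst hgR'
        have he : (pvRepresentantes (ks ++ [c]))[R]'(by rw [hlen']; omega) = (ks.length : Int) := by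
          simp only [hrep']
          rw [List.getElem_append_right (by omega)]
          simp
        rw [he, PySem.Dict.getD_insert_self, pvGrupoDe_eq_occK, pvGetD_append_last,
          pvOccK_append, pvOccK_nil_of_not_mem ks hmem]
        simp
    · rw [PySem.Dict.keys_insert_of_not_contains _ _ hco, k3, hrep']
      rw [List.map_append]
      congr 1
      · refine (List.map_congr_left ?_).symm
        intro r hr
        have hb := pvReps_mem_bounds ks hr
        exact pvGetD_append_lt ks c hb.1 hb.2
      · simp
    · intro g hg
      rw [hlen'] at hg
      by_cases hgR : g < R
      · have he : (pvRepresentantes (ks ++ [c]))[g]'(by omega) = reps[g] := by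
          simp only [hrep']
          exact List.getElem_append_left _
        rw [he, hstab g hgR]
        have hne : PySem.List.pyGetD ks (reps[g]) "" ≠ c := by
          intro heq
          exact hmem (heq ▸ hkeymem g hgR)
        rw [PySem.Dict.getD_insert_of_ne _ _ _ hne]
        exact k4 g hgR
      · have hgR' : g = R := by omega
        subst hgR'
        have he : (pvRepresentantes (ks ++ [c]))[R]'(by rw [hlen']; omega) = (ks.length : Int) := by
          simp only [hrep']
          rw [List.getElem_append_right (by omega)]
          simp
        rw [he, pvGetD_append_last, PySem.Dict.getD_insert_self]
    · rw [PySem.Dict.keys_insert_of_not_contains _ _ hco]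
      refine List.Nodup.append k5 (List.nodup_singleton c) ?_
      intro a ha hb
      rw [List.mem_singleton] at hb
      subst hb
      exact hmem ((hkeysmem _).mp ha)
    · intro k
      rw [PySem.Dict.contains_eq_decide_mem_keys, decide_eq_decide,
        PySem.Dict.mem_keys_insert]
      simp only [List.mem_append, List.mem_singleton]
      constructor
      · rintro (rfl | hk)
        · exact Or.inr rfl
        · exact Or.inl ((hkeysmem k).mp hk)
      · rintro (hk | rfl)
        · exact Or.inr ((hkeysmem k).mpr hk)
        · exact Or.inl rfl

lemma pvInvKS_loop (m : List (List Int)) :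
    pvInvKS (m.map pvKey)
      ((PySem.List.enumerate m).foldl pvStepA (PySem.Dict.empty, PySem.Dict.empty)) := by
  induction m using List.reverseRecOn with
  | nil => exact pvInvKS_empty
  | append_singleton t x ih =>
    rw [PySem.List.enumerate_append, List.foldl_append]
    simp only [PySem.List.enumerate_cons, PySem.List.enumerate_nil, List.foldl_cons,
      List.foldl_nil, zero_add]
    have hstep := pvInvKS_step (t.map pvKey) x _ ih
    rw [List.map_append]
    simpa using hstep

-- ===== VERDICT (by name: the statement is the Claim_ definition above) =====
theorem agrupar_filas_spec : Claim_equal_agrupar_filas := by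
  unfold Claim_equal_agrupar_filas
  intro m _
  unfold Spec_agrupar_filas agrupar_filas agrupar_filas_alt
  obtain ⟨k1, k2, -, -, -, -⟩ := pvInvKS_loop m
  set claves := m.map pvKey with hclaves
  set reps := pvRepresentantes claves with hrepsdef
  set g := ((PySem.List.enumerate m).foldl pvStepA (PySem.Dict.empty, PySem.Dict.empty)).1 with hgdef
  have hgnodup : g.keys.Nodup := k1 ▸ pvIds_nodup _
  have hA : g.items = g.keys.map (fun k => (k, g.getD k [])) :=
    PySem.Dict.items_eq_map_keys g hgnodup []
  have hBfresh : ((PySem.List.enumerate reps).foldl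
      (fun (d : PySem.Dict Int (List Int)) q => d.insert (q.1 + 1) (pvGrupoDe claves q.2))
      PySem.Dict.empty).items
      = (PySem.Dict.empty : PySem.Dict Int (List Int)).items
        ++ (PySem.List.enumerate reps).map (fun q => (q.1 + 1, pvGrupoDe claves q.2)) := by
    apply PySem.Dict.items_foldl_insert_fresh
    · intro a _; exact PySem.Dict.contains_empty _
    · have hp := PySem.List.pairwise_lt_enumerate reps 0
      have hp2 : ((PySem.List.enumerate reps).map (fun q => q.1 + 1)).Pairwise (· < ·) :=
        (List.pairwise_map).mpr (hp.imp (fun h => by omega))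
      exact hp2.imp (fun h => ne_of_lt h)
  have hempty : (PySem.Dict.empty : PySem.Dict Int (List Int)).items = [] := by
    simp [PySem.Dict.empty]
  rw [hA, hBfresh, hempty, List.nil_append]
  apply List.ext_getElem
  · rw [k1]
    simp [pvIds_length, PySem.List.length_enumerate]
  · intro i h1 h2
    have hiR : i < reps.length := by
      simp only [List.length_map, PySem.List.length_enumerate] at h2
      exact h2
    have hkey : g.keys[i]'(by rw [k1, pvIds_length]; exact hiR) = (i : Int) + 1 := by
      have := pvIds_getElem reps.length i (by rw [pvIds_length]; exact hiR)
      simp [k1, this]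
    simp only [List.getElem_map, PySem.List.getElem_enumerate, hkey]
    rw [k2 i hiR]
    simp
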